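-- pv_equiv track=rewrite | github.com/zedzima/vividigit-site | core/src/main.py | build_labels_from_facets
-- ===== SOURCE A (Python) =====
-- from typing import Dict, Any, List, Optional
--
-- def build_labels_from_facets(items: List[Dict], page_lookup: Dict) -> Dict[str, Dict[str, str]]:
--     """
--     Build labels dict from all facets referenced by items.
--     Returns {dimension: {slug: label}} for all entity slugs in facets.
--     """
--     labels = {}
--     for item in items:
--         for dimension, slugs in item.get("facets", {}).items():
--             if dimension not in labels:
--                 labels[dimension] = {}
--             for slug in slugs:
--                 if slug not in labels[dimension]:
--                     entry = page_lookup.get(slug)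
--                     if entry:
--                         labels[dimension][slug] = entry.get("menu") or entry.get("title") or slug
--                     else:
--                         labels[dimension][slug] = slug
--     return labels
-- ===== SOURCE B (Python) =====
-- def build_labels_from_facets(items, page_lookup):
--     # Pass 1: gather, per dimension, the ordered set of slugs referenced by any item.
--     referenced = {}
--     for item in items:
--         for dimension, slugs in item.get("facets", {}).items():
--             seen = referenced.get(dimension, {})
--             for slug in slugs:
--                 seen[slug] = None
--             referenced[dimension] = seen
--
--     # Pass 2: resolve each referenced slug to its label.
--     def resolve(slug):
--         entry = page_lookup.get(slug)
--         if entry: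
--             return entry.get("menu") or entry.get("title") or slug
--         return slug
--
--     return {dim: {slug: resolve(slug) for slug in seen}
--             for dim, seen in referenced.items()}
-- ===== Notes on version B (the rewrite author's own statement) =====
-- stated objective: alternative
-- what changed: Splits A's single interleaved pass into two differently-shaped passes: first gather an ordered set of referenced slugs per dimension, then resolve labels only in a final dict comprehension over that intermediate map.
import Mathlib
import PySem

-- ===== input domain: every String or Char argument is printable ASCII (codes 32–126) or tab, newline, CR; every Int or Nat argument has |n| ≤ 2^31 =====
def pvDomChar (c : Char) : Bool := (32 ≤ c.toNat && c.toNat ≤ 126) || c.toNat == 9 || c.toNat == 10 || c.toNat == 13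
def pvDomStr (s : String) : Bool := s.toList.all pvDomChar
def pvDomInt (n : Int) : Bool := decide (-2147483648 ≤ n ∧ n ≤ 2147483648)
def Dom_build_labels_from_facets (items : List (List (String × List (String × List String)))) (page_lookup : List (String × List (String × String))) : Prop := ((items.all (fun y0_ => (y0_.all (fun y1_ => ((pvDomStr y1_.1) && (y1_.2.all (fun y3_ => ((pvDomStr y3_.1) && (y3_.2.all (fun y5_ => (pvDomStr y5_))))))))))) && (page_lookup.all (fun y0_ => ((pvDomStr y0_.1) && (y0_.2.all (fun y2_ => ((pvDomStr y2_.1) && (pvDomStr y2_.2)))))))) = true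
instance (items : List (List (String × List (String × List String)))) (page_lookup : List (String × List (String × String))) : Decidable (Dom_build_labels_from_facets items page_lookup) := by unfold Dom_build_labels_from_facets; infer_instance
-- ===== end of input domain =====

-- B re-implements A by two passes (gather referenced slugs per dimension, then resolve labels);
-- same asymptotic cost, different decomposition. Proven equal to A on all inputs.

-- shared Python-semantics helper: the string expression `x or y` (x an Optional[str])
def pyOrS (x : Option String) (y : String) : String :=
  match x with
  | some s => if s = "" then y else s
  | none => y

-- ===== PORT A =====
def build_labels_from_facets (items : List (List (String × List (String × List String)))) (page_lookup : List (String × List (String × String))) : List (String × List (String × String)) :=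
  let labels : PySem.Dict String (PySem.Dict String String) :=
    items.foldl (fun labels item =>
      ((PySem.Dict.mk item).getD "facets" []).foldl (fun labels ds =>
        -- for dimension, slugs in item.get("facets", {}).items()
        let labels := if (labels.get? ds.1).isNone then labels.insert ds.1 PySem.Dict.empty else labels
        ds.2.foldl (fun labels slug =>
          let inner := labels.getD ds.1 PySem.Dict.empty  -- labels[dimension] (always present here)
          if (inner.get? slug).isNone then
            let entry := (PySem.Dict.mk page_lookup).get? slug
            let label :=
              match entry with
              | some e => if e ≠ [] then pyOrS ((PySem.Dict.mk e).get? "menu") (pyOrS ((PySem.Dict.mk e).get? "title") slug) else slug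
              | none => slug
            labels.insert ds.1 (inner.insert slug label)
          else labels) labels) labels) PySem.Dict.empty
  labels.items.map (fun p => (p.1, p.2.items))

-- ===== PORT B =====
def bl_resolve (page_lookup : List (String × List (String × String))) (slug : String) : String :=
  match (PySem.Dict.mk page_lookup).get? slug with
  | some e => if e ≠ [] then pyOrS ((PySem.Dict.mk e).get? "menu") (pyOrS ((PySem.Dict.mk e).get? "title") slug) else slug
  | none => slug

def build_labels_from_facets_alt (items : List (List (String × List (String × List String)))) (page_lookup : List (String × List (String × String))) : List (String × List (String × String)) :=
  let referenced : PySem.Dict String (List String) :=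
    items.foldl (fun ref item =>
      ((PySem.Dict.mk item).getD "facets" []).foldl (fun ref ds =>
        -- seen = referenced.get(dimension, {}); for slug in slugs: seen[slug] = None; referenced[dimension] = seen
        ref.insert ds.1 (ds.2.foldl PySem.Set.add (ref.getD ds.1 []))) ref) PySem.Dict.empty
  -- {dim: {slug: resolve(slug) for slug in seen} for dim, seen in referenced.items()}
  -- (all dict keys here are distinct — referenced and each seen are dicts — so the comprehension's items ARE this map)
  referenced.items.map (fun p => (p.1, p.2.map (fun s => (s, bl_resolve page_lookup s))))

-- ===== PRECONDITION & SPEC =====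
def Spec_build_labels_from_facets (items : List (List (String × List (String × List String)))) (page_lookup : List (String × List (String × String))) (out : List (String × List (String × String))) : Prop := out = build_labels_from_facets_alt items page_lookup
instance (items : List (List (String × List (String × List String)))) (page_lookup : List (String × List (String × String))) (out : List (String × List (String × String))) : Decidable (Spec_build_labels_from_facets items page_lookup out) := by unfold Spec_build_labels_from_facets; infer_instance

-- ===== CLAIM (what is proved, stated in full; the proofs are below) =====
def Claim_equal_build_labels_from_facets : Prop := ∀ (items : List (List (String × List (String × List String)))) (page_lookup : List (String × List (String × String))), Dom_build_labels_from_facets items page_lookup → Spec_build_labels_from_facets items page_lookup (build_labels_from_facets items page_lookup)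

-- ===== LEMMAS AND PROOFS =====

-- the three loop bodies of port A, named (definitionally the lambdas in the port)
def stepSlugA (pl : List (String × List (String × String))) (dim : String) (labels : PySem.Dict String (PySem.Dict String String)) (slug : String) : PySem.Dict String (PySem.Dict String String) :=
  let inner := labels.getD dim PySem.Dict.empty
  if (inner.get? slug).isNone then
    let entry := (PySem.Dict.mk pl).get? slug
    let label :=
      match entry with
      | some e => if e ≠ [] then pyOrS ((PySem.Dict.mk e).get? "menu") (pyOrS ((PySem.Dict.mk e).get? "title") slug) else slug
      | none => slug
    labels.insert dim (inner.insert slug label)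
  else labels

def stepDimA (pl : List (String × List (String × String))) (labels : PySem.Dict String (PySem.Dict String String)) (ds : String × List String) : PySem.Dict String (PySem.Dict String String) :=
  ds.2.foldl (stepSlugA pl ds.1) (if (labels.get? ds.1).isNone then labels.insert ds.1 PySem.Dict.empty else labels)

def stepItemA (pl : List (String × List (String × String))) (labels : PySem.Dict String (PySem.Dict String String)) (item : List (String × List (String × List String))) : PySem.Dict String (PySem.Dict String String) :=
  ((PySem.Dict.mk item).getD "facets" []).foldl (stepDimA pl) labels

-- the two loop bodies of port B, named
def stepDimB (ref : PySem.Dict String (List String)) (ds : String × List String) : PySem.Dict String (List String) :=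
  ref.insert ds.1 (ds.2.foldl PySem.Set.add (ref.getD ds.1 []))

def stepItemB (ref : PySem.Dict String (List String)) (item : List (String × List (String × List String))) : PySem.Dict String (List String) :=
  ((PySem.Dict.mk item).getD "facets" []).foldl stepDimB ref

-- render B's per-dimension slug set as A's per-dimension label dict
def blRI (pl : List (String × List (String × String))) (ss : List String) : PySem.Dict String String :=
  PySem.Dict.mk (ss.map (fun s => (s, bl_resolve pl s)))

-- render B's whole state as A's whole state
def blR (pl : List (String × List (String × String))) (d : PySem.Dict String (List String)) : PySem.Dict String (PySem.Dict String String) :=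
  PySem.Dict.mk (d.items.map (fun p => (p.1, blRI pl p.2)))

theorem blR_get? (pl : List (String × List (String × String))) (d : PySem.Dict String (List String)) (k : String) :
    (blR pl d).get? k = (d.get? k).map (blRI pl) := by
  obtain ⟨l⟩ := d
  induction l with
  | nil => rfl
  | cons p t ih =>
    rw [show blR pl ⟨p :: t⟩ = ⟨(p.1, blRI pl p.2) :: t.map (fun q => (q.1, blRI pl q.2))⟩ from rfl]
    rw [PySem.Dict.get?_mk_cons, PySem.Dict.get?_mk_cons]
    by_cases h : p.1 == k
    · simp [h]
    · simp only [h, Bool.false_eq_true, ite_false]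
      exact ih

theorem blR_contains (pl : List (String × List (String × String))) (d : PySem.Dict String (List String)) (k : String) :
    (blR pl d).contains k = d.contains k := by
  simp [blR, PySem.Dict.contains, List.any_map, Function.comp_def]

theorem blRI_get? (pl : List (String × List (String × String))) (ss : List String) (s : String) :
    (blRI pl ss).get? s = if s ∈ ss then some (bl_resolve pl s) else none := by
  induction ss with
  | nil => rfl
  | cons a t ih =>
    rw [show blRI pl (a :: t) = ⟨(a, bl_resolve pl a) :: t.map (fun x => (x, bl_resolve pl x))⟩ from rfl]
    rw [PySem.Dict.get?_mk_cons]
    by_cases h : a = s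
    · subst h; simp
    · have hb : (a == s) = false := by simp [h]
      simp only [hb, Bool.false_eq_true, ite_false, List.mem_cons]
      rw [show (⟨t.map (fun x => (x, bl_resolve pl x))⟩ : PySem.Dict String String) = blRI pl t from rfl, ih]
      simp [Ne.symm h]

theorem blR_insert (pl : List (String × List (String × String))) (d : PySem.Dict String (List String)) (k : String) (v : List String) :
    blR pl (d.insert k v) = (blR pl d).insert k (blRI pl v) := by
  apply PySem.Dict.ext
  rw [show ∀ d' : PySem.Dict String (List String), (blR pl d').items = d'.items.map (fun p => (p.1, blRI pl p.2)) from fun _ => rfl]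
  simp only [PySem.Dict.insert, blR_contains]
  by_cases h : d.contains k
  · simp only [h, if_true]
    rw [show (blR pl d).items = d.items.map (fun p => (p.1, blRI pl p.2)) from rfl]
    simp only [List.map_map]
    apply List.map_congr_left
    intro p _
    by_cases hp : p.1 == k <;> simp [Function.comp, hp]
  · simp only [h, Bool.false_eq_true, if_false]
    rw [show (blR pl d).items = d.items.map (fun p => (p.1, blRI pl p.2)) from rfl]
    simp

theorem map_repl_eq {κ ν : Type} [BEq κ] [LawfulBEq κ] (l : List (κ × ν)) (k : κ) (v : ν)
    (hnd : (l.map Prod.fst).Nodup)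
    (h : (l.find? (fun p => p.1 == k)).map (fun p => p.2) = some v) :
    l.map (fun p => if p.1 == k then (k, v) else p) = l := by
  induction l with
  | nil => simp at h
  | cons p t ih =>
    simp only [List.map_cons, List.nodup_cons] at hnd
    by_cases hp : p.1 == k
    · simp only [List.find?_cons, hp] at h
      simp only [Option.map_some, Option.some.injEq] at h
      have hk : p.1 = k := by simpa using hp
      have hpv : (if (p.1 == k) = true then (k, v) else p) = p := by
        simp only [hp, if_true]; rw [← hk, ← h]
      rw [List.map_cons, hpv]
      congr 1
      conv_rhs => rw [← List.map_id t]
      apply List.map_congr_left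
      intro q hq
      have : q.1 ≠ p.1 := fun he => hnd.1 (he ▸ List.mem_map_of_mem hq)
      have : (q.1 == k) = false := by simp [hk ▸ this]
      simp [this]
    · simp only [List.find?_cons, hp] at h
      rw [List.map_cons]
      simp only [hp, Bool.false_eq_true, if_false]
      rw [ih hnd.2 h]

theorem insert_self_of_get? {κ ν : Type} [BEq κ] [LawfulBEq κ] (d : PySem.Dict κ ν) (k : κ) (v : ν)
    (hnd : d.keys.Nodup) (h : d.get? k = some v) : d.insert k v = d := by
  have h' : (d.items.find? (fun p => p.1 == k)).map (fun p => p.2) = some v := by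
    simpa [PySem.Dict.get?] using h
  have hc : d.contains k = true := by
    rcases Option.map_eq_some_iff.mp h' with ⟨p, hp, _⟩
    simp only [PySem.Dict.contains, List.any_eq_true]
    have hps := List.find?_some hp
    exact ⟨p, List.mem_of_find?_eq_some hp, by simpa using hps⟩
  apply PySem.Dict.ext
  simp only [PySem.Dict.insert, hc, if_true]
  exact map_repl_eq d.items k v hnd h'

theorem blRI_insert_not_mem (pl : List (String × List (String × String))) (ss : List String) (s : String) (h : s ∉ ss) :
    (blRI pl ss).insert s (bl_resolve pl s) = blRI pl (ss ++ [s]) := by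
  have hc : (blRI pl ss).contains s = false := by
    rw [← Bool.not_eq_true]
    simp only [PySem.Dict.contains, blRI, List.any_map, Function.comp_def, List.any_eq_true]
    rintro ⟨x, hx, hxe⟩
    exact h ((beq_iff_eq.mp hxe) ▸ hx)
  apply PySem.Dict.ext
  simp only [PySem.Dict.insert, hc, Bool.false_eq_true, if_false]
  rw [show (blRI pl ss).items = ss.map (fun x => (x, bl_resolve pl x)) from rfl]
  rw [show (blRI pl (ss ++ [s])).items = (ss ++ [s]).map (fun x => (x, bl_resolve pl x)) from rfl]
  simp

theorem slugfold (pl : List (String × List (String × String))) (dim : String) :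
    ∀ (slugs : List String) (ref : PySem.Dict String (List String)) (seen : List String),
      slugs.foldl (stepSlugA pl dim) (blR pl (ref.insert dim seen))
        = blR pl (ref.insert dim (slugs.foldl PySem.Set.add seen)) := by
  intro slugs
  induction slugs with
  | nil => intro ref seen; rfl
  | cons slug rest ih =>
    intro ref seen
    rw [List.foldl_cons, List.foldl_cons]
    have hinner : (blR pl (ref.insert dim seen)).getD dim PySem.Dict.empty = blRI pl seen := by
      rw [PySem.Dict.getD_eq_get?_getD, blR_get?, PySem.Dict.get?_insert_self]
      rfl
    by_cases hm : slug ∈ seen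
    · have : stepSlugA pl dim (blR pl (ref.insert dim seen)) slug = blR pl (ref.insert dim seen) := by
        simp only [stepSlugA, hinner, blRI_get?, hm, if_true, Option.isNone_some,
          Bool.false_eq_true, if_false]
      rw [this, PySem.Set.add_of_mem hm, ih ref seen]
    · have hstep : stepSlugA pl dim (blR pl (ref.insert dim seen)) slug
          = blR pl (ref.insert dim (seen ++ [slug])) := by
        simp only [stepSlugA, hinner, blRI_get?, hm, if_false, Option.isNone_none, if_true]
        rw [show (match (PySem.Dict.mk pl).get? slug with
              | some e => if e ≠ [] then pyOrS ((PySem.Dict.mk e).get? "menu") (pyOrS ((PySem.Dict.mk e).get? "title") slug) else slug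
              | none => slug) = bl_resolve pl slug from rfl]
        rw [blRI_insert_not_mem pl seen slug hm, ← blR_insert, PySem.Dict.insert_insert_self]
      rw [hstep, PySem.Set.add_of_not_mem hm]
      exact ih ref (seen ++ [slug])

theorem dimstep (pl : List (String × List (String × String))) (ref : PySem.Dict String (List String))
    (hnd : ref.keys.Nodup) (ds : String × List String) :
    stepDimA pl (blR pl ref) ds = blR pl (stepDimB ref ds) := by
  unfold stepDimA stepDimB
  cases h : ref.get? ds.1 with
  | none =>
    have h0 : (blR pl ref).get? ds.1 = none := by rw [blR_get?, h]; rfl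
    rw [h0]
    simp only [Option.isNone_none, if_true]
    rw [show (PySem.Dict.empty : PySem.Dict String String) = blRI pl [] from rfl, ← blR_insert]
    rw [slugfold pl ds.1 ds.2 ref []]
    rw [PySem.Dict.getD_eq_get?_getD, h]
    rfl
  | some seen =>
    have h0 : (blR pl ref).get? ds.1 = some (blRI pl seen) := by rw [blR_get?, h]; rfl
    rw [h0]
    simp only [Option.isNone_some, Bool.false_eq_true, if_false]
    rw [show blR pl ref = blR pl (ref.insert ds.1 seen) by
      rw [insert_self_of_get? ref ds.1 seen hnd h]]
    rw [slugfold pl ds.1 ds.2 ref seen]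
    rw [PySem.Dict.getD_eq_get?_getD, h]
    rfl

theorem nodup_stepDimB (ref : PySem.Dict String (List String)) (hnd : ref.keys.Nodup) (ds : String × List String) :
    (stepDimB ref ds).keys.Nodup :=
  PySem.Dict.nodup_keys_insert _ _ _ hnd

theorem nodup_foldDimB (pairs : List (String × List String)) :
    ∀ (ref : PySem.Dict String (List String)), ref.keys.Nodup → (pairs.foldl stepDimB ref).keys.Nodup := by
  induction pairs with
  | nil => intro ref hnd; exact hnd
  | cons p t ih => intro ref hnd; exact ih _ (nodup_stepDimB ref hnd p)

theorem foldDim (pl : List (String × List (String × String))) (pairs : List (String × List String)) :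
    ∀ (ref : PySem.Dict String (List String)), ref.keys.Nodup →
      pairs.foldl (stepDimA pl) (blR pl ref) = blR pl (pairs.foldl stepDimB ref) := by
  induction pairs with
  | nil => intro ref _; rfl
  | cons p t ih =>
    intro ref hnd
    rw [List.foldl_cons, List.foldl_cons, dimstep pl ref hnd p]
    exact ih _ (nodup_stepDimB ref hnd p)

theorem folditems (pl : List (String × List (String × String))) (items : List (List (String × List (String × List String)))) :
    ∀ (ref : PySem.Dict String (List String)), ref.keys.Nodup →
      items.foldl (stepItemA pl) (blR pl ref) = blR pl (items.foldl stepItemB ref) := by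
  induction items with
  | nil => intro ref _; rfl
  | cons item t ih =>
    intro ref hnd
    rw [List.foldl_cons, List.foldl_cons]
    rw [show stepItemA pl (blR pl ref) item = blR pl (stepItemB ref item) from
      foldDim pl _ ref hnd]
    exact ih _ (nodup_foldDimB _ ref hnd)

-- ===== VERDICT (by name: the statement is the Claim_ definition above) =====
theorem build_labels_from_facets_spec : Claim_equal_build_labels_from_facets := by
  intro items pl _
  show build_labels_from_facets items pl = build_labels_from_facets_alt items pl
  have hA : build_labels_from_facets items pl
      = (items.foldl (stepItemA pl) PySem.Dict.empty).items.map (fun p => (p.1, p.2.items)) := rfl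
  have hB : build_labels_from_facets_alt items pl
      = (items.foldl stepItemB PySem.Dict.empty).items.map
          (fun p => (p.1, p.2.map (fun s => (s, bl_resolve pl s)))) := rfl
  rw [hA, hB]
  rw [show (PySem.Dict.empty : PySem.Dict String (PySem.Dict String String)) = blR pl PySem.Dict.empty from rfl]
  rw [folditems pl items PySem.Dict.empty (by simp [PySem.Dict.keys, PySem.Dict.empty])]
  rw [show (blR pl (items.foldl stepItemB PySem.Dict.empty)).items
      = (items.foldl stepItemB PySem.Dict.empty).items.map (fun p => (p.1, blRI pl p.2)) from rfl]
  rw [List.map_map]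
  apply List.map_congr_left
  intro p _
  rfl
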